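-- pv_equiv track=rewrite | github.com/harunardi/dissertation_codes | SRC_ALL/XSPROCESS_2D_RECT.py | convert_index_2D_rect
-- ===== SOURCE A (Python) =====
-- def convert_index_2D_rect(D, I_max, J_max):
--     conv = [0] * (I_max*J_max)
--     tmp_conv = 0
--     for j in range(J_max):
--         for i in range(I_max):
--             if D[0][j][i] != 0:
--                 tmp_conv += 1
--                 m = j * I_max + i
--                 conv[m] = tmp_conv
--     return conv
-- ===== SOURCE B (Python) =====
-- def convert_index_2D_rect(D, I_max, J_max):
--     # three-pass decomposition: indicator list, prefix sums, mask
--     flat = [1 if D[0][j][i] != 0 else 0 for j in range(J_max) for i in range(I_max)]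
--     cum = []
--     s = 0
--     for f in flat:
--         s += f
--         cum.append(s)
--     return [c if f else 0 for f, c in zip(flat, cum)]
-- ===== Notes on version B (the rewrite author's own statement) =====
-- stated objective: alternative
-- what changed: Replaces A's single interleaved count-and-write loop over a preallocated array by three separate passes: build a flat 0/1 indicator list, compute its running prefix sums, then mask the prefix sums back to zeros.
-- intended difference: When both I_max and J_max are negative, A returns a nonempty all-zero list of length I_max*J_max (the accidental positive product of two negatives), while B returns [], the intended result for nonpositive grid dimensions. — e.g. on convert_index_2D_rect([], -1, -1): A returns [0], B returns []
import Mathlib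
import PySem

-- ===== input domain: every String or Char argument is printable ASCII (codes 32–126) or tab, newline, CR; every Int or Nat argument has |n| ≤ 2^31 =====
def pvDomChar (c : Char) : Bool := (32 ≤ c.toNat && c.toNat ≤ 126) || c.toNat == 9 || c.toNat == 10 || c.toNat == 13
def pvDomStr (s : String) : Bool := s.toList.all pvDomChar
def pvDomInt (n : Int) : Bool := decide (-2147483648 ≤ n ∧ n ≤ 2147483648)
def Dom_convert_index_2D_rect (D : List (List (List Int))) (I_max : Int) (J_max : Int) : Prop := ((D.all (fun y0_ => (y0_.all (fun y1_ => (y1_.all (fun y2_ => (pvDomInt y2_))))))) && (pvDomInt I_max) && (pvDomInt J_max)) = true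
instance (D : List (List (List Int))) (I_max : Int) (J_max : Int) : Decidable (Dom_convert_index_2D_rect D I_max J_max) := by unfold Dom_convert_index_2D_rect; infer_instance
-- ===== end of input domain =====

-- B replaces A's interleaved count-and-write loop by three passes (indicator list, prefix sums, mask); alternative decomposition, same cost.


-- ===== PORT A =====
def convert_index_2D_rect (D : List (List (List Int))) (I_max : Int) (J_max : Int) : List Int :=
  let conv := List.replicate (I_max * J_max).toNat (0 : Int)
  (((PySem.List.pyRange 0 J_max 1).foldl (fun (st : List Int × Int) j =>
      (PySem.List.pyRange 0 I_max 1).foldl (fun (st : List Int × Int) i =>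
        if PySem.List.pyGetD (PySem.List.pyGetD (PySem.List.pyGetD D 0 []) j []) i 0 ≠ 0 then
          (PySem.List.pySetD st.1 (j * I_max + i) (st.2 + 1), st.2 + 1)
        else st) st) (conv, 0))).1

-- ===== PORT B =====
def convert_index_2D_rect_alt (D : List (List (List Int))) (I_max : Int) (J_max : Int) : List Int :=
  let flat := (PySem.List.pyRange 0 J_max 1).flatMap (fun j =>
      (PySem.List.pyRange 0 I_max 1).map (fun i =>
        if PySem.List.pyGetD (PySem.List.pyGetD (PySem.List.pyGetD D 0 []) j []) i 0 ≠ 0 then (1 : Int) else 0))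
  let cum := (flat.foldl (fun (st : List Int × Int) f => (st.1 ++ [st.2 + f], st.2 + f)) ([], 0)).1
  (flat.zip cum).map (fun p => if p.1 ≠ 0 then p.2 else 0)

-- ===== PRECONDITION & SPEC =====
-- Pre_ excludes exactly the inputs on which Python A raises IndexError: both dimensions positive but D empty,
-- D[0] shorter than J_max, or one of its first J_max rows shorter than I_max.
def Pre_convert_index_2D_rect (D : List (List (List Int))) (I_max : Int) (J_max : Int) : Prop :=
  0 < I_max → 0 < J_max →
    J_max ≤ ((D.headD []).length : Int) ∧
    ∀ row ∈ (D.headD []).take J_max.toNat, I_max ≤ (row.length : Int)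
instance (D : List (List (List Int))) (I_max : Int) (J_max : Int) : Decidable (Pre_convert_index_2D_rect D I_max J_max) := by unfold Pre_convert_index_2D_rect; infer_instance

def pvWitness_convert_index_2D_rect : List (List (List Int)) × Int × Int :=
  ([[[0, 3], [5, 0]]], 2, 2)

-- When both dimensions are negative, A returns a nonempty all-zero list of length I_max*J_max (the accidental
-- positive product of two negatives); B returns the empty list, the intended result for nonpositive dimensions.
def D_convert_index_2D_rect (D : List (List (List Int))) (I_max : Int) (J_max : Int) : Prop :=
  I_max < 0 ∧ J_max < 0
instance (D : List (List (List Int))) (I_max : Int) (J_max : Int) : Decidable (D_convert_index_2D_rect D I_max J_max) := by unfold D_convert_index_2D_rect; infer_instance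

def Spec_convert_index_2D_rect (D : List (List (List Int))) (I_max : Int) (J_max : Int) (out : List Int) : Prop := ¬ D_convert_index_2D_rect D I_max J_max → out = convert_index_2D_rect_alt D I_max J_max
instance (D : List (List (List Int))) (I_max : Int) (J_max : Int) (out : List Int) : Decidable (Spec_convert_index_2D_rect D I_max J_max out) := by unfold Spec_convert_index_2D_rect; infer_instance

def pvDiffWitness_convert_index_2D_rect : List (List (List Int)) × Int × Int := ([], -1, -1)
def pvDiffWitnessOut_convert_index_2D_rect : (List Int) × (List Int) := ([0], [])

-- ===== CLAIM (what is proved, stated in full; the proofs are below) =====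
def Claim_unchanged_convert_index_2D_rect : Prop := ∀ (D : List (List (List Int))) (I_max : Int) (J_max : Int), Dom_convert_index_2D_rect D I_max J_max → Pre_convert_index_2D_rect D I_max J_max → Spec_convert_index_2D_rect D I_max J_max (convert_index_2D_rect D I_max J_max)
def Claim_changed_convert_index_2D_rect : Prop := Dom_convert_index_2D_rect (pvDiffWitness_convert_index_2D_rect.1) (pvDiffWitness_convert_index_2D_rect.2.1) (pvDiffWitness_convert_index_2D_rect.2.2) ∧ Pre_convert_index_2D_rect (pvDiffWitness_convert_index_2D_rect.1) (pvDiffWitness_convert_index_2D_rect.2.1) (pvDiffWitness_convert_index_2D_rect.2.2) ∧ D_convert_index_2D_rect (pvDiffWitness_convert_index_2D_rect.1) (pvDiffWitness_convert_index_2D_rect.2.1) (pvDiffWitness_convert_index_2D_rect.2.2) ∧ convert_index_2D_rect (pvDiffWitness_convert_index_2D_rect.1) (pvDiffWitness_convert_index_2D_rect.2.1) (pvDiffWitness_convert_index_2D_rect.2.2) = pvDiffWitnessOut_convert_index_2D_rect.1 ∧ convert_index_2D_rect_alt (pvDiffWitness_convert_index_2D_rect.1) (pvDiffWitness_convert_index_2D_rect.2.1)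 (pvDiffWitness_convert_index_2D_rect.2.2) = pvDiffWitnessOut_convert_index_2D_rect.2 ∧ pvDiffWitnessOut_convert_index_2D_rect.1 ≠ pvDiffWitnessOut_convert_index_2D_rect.2
def Claim_exact_convert_index_2D_rect : Prop := ∀ (D : List (List (List Int))) (I_max : Int) (J_max : Int), Dom_convert_index_2D_rect D I_max J_max → Pre_convert_index_2D_rect D I_max J_max → D_convert_index_2D_rect D I_max J_max → convert_index_2D_rect D I_max J_max ≠ convert_index_2D_rect_alt D I_max J_max

-- ===== LEMMAS AND PROOFS =====

-- the common abstract result: sequential indices at the nonzero entries of the raw flat list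
def maskCum (t : Int) : List Int → List Int
  | [] => []
  | f :: fs => if f ≠ 0 then (t + 1) :: maskCum (t + 1) fs else 0 :: maskCum t fs

-- prefix sums starting from s
def prefixSums (s : Int) : List Int → List Int
  | [] => []
  | f :: fs => (s + f) :: prefixSums (s + f) fs

theorem maskCum_length (fs : List Int) : ∀ t, (maskCum t fs).length = fs.length := by
  induction fs with
  | nil => intro t; rfl
  | cons f fs ih => intro t; simp only [maskCum]; split <;> simp [ih]

theorem maskCum_append (xs : List Int) : ∀ (ys : List Int) (t : Int),
    maskCum t (xs ++ ys) = maskCum t xs ++ maskCum (t + ((xs.countP (· ≠ 0) : Nat) : Int)) ys := by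
  induction xs with
  | nil => intro ys t; simp [maskCum]
  | cons x xs ih =>
    intro ys t
    by_cases hx : x ≠ 0
    · simp only [List.cons_append, maskCum, List.countP_cons]
      rw [ih]
      simp [hx]
      congr 1
      ring
    · simp only [List.cons_append, maskCum, hx, ite_false, List.countP_cons]
      rw [ih]
      simp

theorem set_len {α : Type} (c : List α) : ∀ (x v : α) (l : List α),
    (c ++ x :: l).set c.length v = c ++ v :: l := by
  induction c with
  | nil => intro x v l; rfl
  | cons a c ih => intro x v l; simp [ih]

-- A's inner loop over one row segment: writes t+1 at position b + k for each k in range' s n with raw value ≠ 0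
theorem innerA (h : Nat → Int) (b : Nat) : ∀ (n s : Nat) (c tail : List Int) (t : Int),
    c.length = b + s →
    (List.range' s n).foldl (fun (st : List Int × Int) k =>
        if h k ≠ 0 then (PySem.List.pySetD st.1 ((b : Int) + (k : Int)) (st.2 + 1), st.2 + 1) else st)
      (c ++ List.replicate n 0 ++ tail, t)
    = (c ++ maskCum t ((List.range' s n).map h) ++ tail,
       t + ((((List.range' s n).map h).countP (· ≠ 0) : Nat) : Int)) := by
  intro n
  induction n with
  | zero => intro s c tail t hc; simp [maskCum]
  | succ n ih =>
    intro s c tail t hc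
    rw [List.range'_succ]
    simp only [List.foldl_cons, List.map_cons, maskCum, List.countP_cons]
    by_cases hs : h s ≠ 0
    · have hset : PySem.List.pySetD (c ++ List.replicate (n+1) 0 ++ tail) ((b : Int) + (s : Int)) (t + 1)
          = (c ++ [t + 1]) ++ List.replicate n 0 ++ tail := by
        have h1 : ((b : Int) + (s : Int)) = ((c.length : Nat) : Int) := by rw [hc]; push_cast; ring
        rw [h1, PySem.List.pySetD_natCast]
        have h2 : c ++ List.replicate (n+1) (0:Int) ++ tail = c ++ (0 : Int) :: (List.replicate n 0 ++ tail) := by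
          simp [List.replicate_succ]
        rw [h2, set_len]
        simp
      rw [if_pos hs, hset, ih (s+1) (c ++ [t+1]) tail (t+1) (by simp [hc]; omega)]
      simp only [Prod.mk.injEq]
      refine ⟨by simp [hs], ?_⟩
      simp [hs]
      ring
    · have h2 : c ++ List.replicate (n+1) (0:Int) ++ tail = (c ++ [0]) ++ List.replicate n 0 ++ tail := by
        simp [List.replicate_succ]
      rw [if_neg hs, h2, ih (s+1) (c ++ [0]) tail t (by simp [hc]; omega)]
      simp [hs]

-- the inner loop as A runs it: over List.range In at row jn, position jn*In + k
theorem innerA0 (h : Nat → Int) (jn In : Nat) (c tail : List Int) (t : Int)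
    (hc : c.length = jn * In) :
    (List.range In).foldl (fun (st : List Int × Int) k =>
        if h k ≠ 0 then (PySem.List.pySetD st.1 ((jn : Int) * (In : Int) + (k : Int)) (st.2 + 1), st.2 + 1) else st)
      (c ++ List.replicate In 0 ++ tail, t)
    = (c ++ maskCum t ((List.range In).map h) ++ tail,
       t + ((((List.range In).map h).countP (· ≠ 0) : Nat) : Int)) := by
  have hfun : (fun (st : List Int × Int) k =>
        if h k ≠ 0 then (PySem.List.pySetD st.1 ((jn : Int) * (In : Int) + (k : Int)) (st.2 + 1), st.2 + 1) else st)
      = (fun (st : List Int × Int) k =>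
        if h k ≠ 0 then (PySem.List.pySetD st.1 (((jn * In : Nat) : Int) + (k : Int)) (st.2 + 1), st.2 + 1) else st) := by
    funext st k
    have : (jn : Int) * (In : Int) + (k : Int) = ((jn * In : Nat) : Int) + (k : Int) := by push_cast; ring
    rw [this]
  rw [hfun, List.range_eq_range', innerA h (jn * In) In 0 c tail t (by omega)]

-- A's outer loop: rows s..s+m, all positions from c.length on still zero
theorem outerA (g : Nat → Nat → Int) (In : Nat) : ∀ (m s : Nat) (c : List Int) (t : Int),
    c.length = s * In →
    (List.range' s m).foldl (fun (st : List Int × Int) jn =>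
        (List.range In).foldl (fun (st : List Int × Int) k =>
          if g jn k ≠ 0 then (PySem.List.pySetD st.1 ((jn : Int) * (In : Int) + (k : Int)) (st.2 + 1), st.2 + 1)
          else st) st)
      (c ++ List.replicate (m * In) 0, t)
    = (c ++ maskCum t ((List.range' s m).flatMap (fun jn => (List.range In).map (g jn))),
       t + ((((List.range' s m).flatMap (fun jn => (List.range In).map (g jn))).countP (· ≠ 0) : Nat) : Int)) := by
  intro m
  induction m with
  | zero => intro s c t hc; simp [maskCum]
  | succ m ih =>
    intro s c t hc
    rw [List.range'_succ]
    simp only [List.foldl_cons, List.flatMap_cons]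
    have hsplit : c ++ List.replicate ((m+1) * In) (0:Int) = c ++ List.replicate In 0 ++ List.replicate (m * In) 0 := by
      rw [List.append_assoc, ← List.replicate_add]
      congr 2
      ring
    rw [hsplit, innerA0 (g s) s In c (List.replicate (m * In) 0) t hc,
        ih (s+1) (c ++ maskCum t ((List.range In).map (g s)))
          (t + ((((List.range In).map (g s)).countP (· ≠ 0) : Nat) : Int))
          (by rw [List.length_append, maskCum_length, List.length_map, List.length_range, hc]; ring),
        maskCum_append]
    simp [List.countP_append]
    ring

-- B's cum loop computes prefix sums
theorem cum_loop (fs : List Int) : ∀ (acc : List Int) (s : Int),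
    (fs.foldl (fun (st : List Int × Int) f => (st.1 ++ [st.2 + f], st.2 + f)) (acc, s)).1
    = acc ++ prefixSums s fs := by
  induction fs with
  | nil => intro acc s; simp [prefixSums]
  | cons f fs ih => intro acc s; simp only [List.foldl_cons, prefixSums]; rw [ih]; simp

-- masking the prefix sums of the 0/1 indicators of raws gives maskCum over the raws
theorem zip_mask (raws : List Int) : ∀ (t : Int),
    (((raws.map (fun r => if r ≠ 0 then (1:Int) else 0)).zip
        (prefixSums t (raws.map (fun r => if r ≠ 0 then (1:Int) else 0)))).map
      (fun p => if p.1 ≠ 0 then p.2 else 0))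
    = maskCum t raws := by
  induction raws with
  | nil => intro t; rfl
  | cons r raws ih =>
    intro t
    simp only [List.map_cons, prefixSums, List.zip_cons_cons, maskCum]
    by_cases hr : r = 0
    · simpa [hr] using ih t
    · simpa [hr] using ih (t + 1)

-- raw values of the grid in scan order (j outer, i inner)
def flatRaw (D : List (List (List Int))) (In Jn : Nat) : List Int :=
  (List.range Jn).flatMap (fun jn : Nat => (List.range In).map (fun k : Nat =>
    PySem.List.pyGetD (PySem.List.pyGetD (PySem.List.pyGetD D 0 []) (Int.ofNat jn) []) (Int.ofNat k) 0))

theorem A_eq (D : List (List (List Int))) (I J : Int) (hI : 0 ≤ I) (hJ : 0 ≤ J) :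
    convert_index_2D_rect D I J = maskCum 0 (flatRaw D I.toNat J.toNat) := by
  obtain ⟨In, rfl⟩ : ∃ n : Nat, I = (n : Int) := ⟨I.toNat, (Int.toNat_of_nonneg hI).symm⟩
  obtain ⟨Jn, rfl⟩ : ∃ n : Nat, J = (n : Int) := ⟨J.toNat, (Int.toNat_of_nonneg hJ).symm⟩
  have h1 : PySem.List.pyRange 0 (Jn : Int) 1 = (List.range Jn).map (fun k : Nat => (k : Int)) := by
    rw [PySem.List.pyRange_one]; simp
  have h2 : PySem.List.pyRange 0 (In : Int) 1 = (List.range In).map (fun k : Nat => (k : Int)) := by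
    rw [PySem.List.pyRange_one]; simp
  have hconv : (((In : Int) * (Jn : Int)).toNat) = Jn * In := by
    rw [← Int.natCast_mul, Int.toNat_natCast]; ring
  have h3 := outerA (fun jn k =>
      PySem.List.pyGetD (PySem.List.pyGetD (PySem.List.pyGetD D 0 []) (jn : Int) []) (k : Int) 0)
    In Jn 0 [] 0 (by simp)
  rw [← List.range_eq_range', List.nil_append] at h3
  have h4 := congrArg Prod.fst h3
  simp only [List.nil_append] at h4
  simp only [convert_index_2D_rect, flatRaw, Int.toNat_natCast, h1, h2, List.foldl_map, hconv]
  exact h4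

theorem B_eq (D : List (List (List Int))) (I J : Int) (hI : 0 ≤ I) (hJ : 0 ≤ J) :
    convert_index_2D_rect_alt D I J = maskCum 0 (flatRaw D I.toNat J.toNat) := by
  obtain ⟨In, rfl⟩ : ∃ n : Nat, I = (n : Int) := ⟨I.toNat, (Int.toNat_of_nonneg hI).symm⟩
  obtain ⟨Jn, rfl⟩ : ∃ n : Nat, J = (n : Int) := ⟨J.toNat, (Int.toNat_of_nonneg hJ).symm⟩
  have h1 : PySem.List.pyRange 0 (Jn : Int) 1 = (List.range Jn).map (fun k : Nat => (k : Int)) := by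
    rw [PySem.List.pyRange_one]; simp
  have h2 : PySem.List.pyRange 0 (In : Int) 1 = (List.range In).map (fun k : Nat => (k : Int)) := by
    rw [PySem.List.pyRange_one]; simp
  have hflat : (PySem.List.pyRange 0 (Jn : Int) 1).flatMap (fun j =>
      (PySem.List.pyRange 0 (In : Int) 1).map (fun i =>
        if PySem.List.pyGetD (PySem.List.pyGetD (PySem.List.pyGetD D 0 []) j []) i 0 ≠ 0 then (1 : Int) else 0))
      = (flatRaw D In Jn).map (fun r => if r ≠ 0 then (1 : Int) else 0) := by
    simp only [h1, h2, flatRaw, List.flatMap_map, List.map_flatMap, List.map_map]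
    rfl
  simp only [convert_index_2D_rect_alt, Int.toNat_natCast]
  rw [cum_loop, List.nil_append, hflat, zip_mask]
-- degenerate-dimension lemmas (I_max ≤ 0 or J_max ≤ 0: no cell is ever written)
theorem foldl_id_int (l : List Int) (init : List Int × Int) :
    l.foldl (fun (st : List Int × Int) (_ : Int) => st) init = init := by
  induction l generalizing init with
  | nil => rfl
  | cons x l ih => simp only [List.foldl_cons]; exact ih init

theorem A_degenerate (D : List (List (List Int))) (I J : Int) (h : I ≤ 0 ∨ J ≤ 0)
    (hIJ : (I * J).toNat = 0) : convert_index_2D_rect D I J = [] := by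
  simp only [convert_index_2D_rect, hIJ, List.replicate_zero]
  rcases h with hI | hJ
  · simp only [PySem.List.pyRange_one_eq_nil hI, List.foldl_nil, foldl_id_int]
  · simp only [PySem.List.pyRange_one_eq_nil hJ, List.foldl_nil]

theorem A_outer_nil (D : List (List (List Int))) (I J : Int) (hJ : J ≤ 0) :
    convert_index_2D_rect D I J = List.replicate (I * J).toNat 0 := by
  simp only [convert_index_2D_rect, PySem.List.pyRange_one_eq_nil hJ, List.foldl_nil]

theorem B_degenerate (D : List (List (List Int))) (I J : Int) (h : I ≤ 0 ∨ J ≤ 0) :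
    convert_index_2D_rect_alt D I J = [] := by
  rcases h with hI | hJ
  · simp [convert_index_2D_rect_alt, PySem.List.pyRange_one_eq_nil hI]
  · simp [convert_index_2D_rect_alt, PySem.List.pyRange_one_eq_nil hJ]

-- ===== VERDICT (by name: the statement is the Claim_ definition above) =====
theorem convert_index_2D_rect_spec : Claim_unchanged_convert_index_2D_rect := by
  intro D I J _ _ hnD
  rcases le_or_gt 0 I with hI | hI
  · rcases le_or_gt 0 J with hJ | hJ
    · rw [A_eq D I J hI hJ, B_eq D I J hI hJ]
    · rw [A_degenerate D I J (Or.inr hJ.le)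
          (Int.toNat_of_nonpos (mul_nonpos_iff.mpr (Or.inl ⟨hI, hJ.le⟩))),
        B_degenerate D I J (Or.inr hJ.le)]
  · have hJ : 0 ≤ J := by
      by_contra hJ
      exact hnD ⟨hI, by omega⟩
    rw [A_degenerate D I J (Or.inl hI.le)
        (Int.toNat_of_nonpos (mul_nonpos_iff.mpr (Or.inr ⟨hI.le, hJ⟩))),
      B_degenerate D I J (Or.inl hI.le)]

theorem convert_index_2D_rect_changed : Claim_changed_convert_index_2D_rect := by
  unfold Claim_changed_convert_index_2D_rect
  refine ⟨by decide, by decide, by decide, by decide, by decide, by decide⟩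

theorem convert_index_2D_rect_tight : Claim_exact_convert_index_2D_rect := by
  intro D I J _ _ hD heq
  rcases hD with ⟨hI, hJ⟩
  rw [A_outer_nil D I J hJ.le, B_degenerate D I J (Or.inl hI.le)] at heq
  have hpos : 0 < I * J := mul_pos_of_neg_of_neg hI hJ
  have hne : (I * J).toNat ≠ 0 := by omega
  rw [List.replicate_eq_nil_iff] at heq
  exact hne heq
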